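-- pv_equiv track=rewrite | github.com/michelp/pgsodium | doctestify.py | doctestify
-- ===== SOURCE A (Python) =====
-- def doctestify(test):
--     lines = test.splitlines()
--     markdown_lines = []
--     in_code_block = False
--
--     for line in lines:
--         if line.startswith("\\") or "-- pragma:hide" in line:
--             continue
--         if line.startswith("--") and not line.startswith("---"):
--             if in_code_block:
--                 markdown_lines.append("```")
--                 in_code_block = False
--             markdown_lines.append(line[3:])
--         else:
--             if not in_code_block:
--                 markdown_lines.append("``` postgres-console")
--                 in_code_block = True
--             line = line.replace("\u21B5", " ")
--             markdown_lines.append(line)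
--
--     if in_code_block:
--         markdown_lines.append("```")
--
--     return "\n".join(markdown_lines)
-- ===== SOURCE B (Python) =====
-- def _is_comment(l):
--     return l.startswith("--") and not l.startswith("---")
--
--
-- def doctestify(test):
--     kept = [l for l in test.splitlines()
--             if not l.startswith("\\") and "-- pragma:hide" not in l]
--     out = []
--     rest = kept
--     while rest:
--         if _is_comment(rest[0]):
--             i = 0
--             while i < len(rest) and _is_comment(rest[i]):
--                 i += 1
--             out += [l[3:] for l in rest[:i]]
--         else:
--             i = 0
--             while i < len(rest) and not _is_comment(rest[i]):
--                 i += 1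
--             out += (["``` postgres-console"]
--                     + [l.replace("\u21B5", " ") for l in rest[:i]]
--                     + ["```"])
--         rest = rest[i:]
--     return "\n".join(out)
-- ===== Notes on version B (the rewrite author's own statement) =====
-- stated objective: alternative
-- what changed: Replaces the threaded in_code_block state machine by: filter out skip lines first, then consume the remaining lines run by run (maximal consecutive comment or code runs), emitting each comment run's line[3:] and each code run wrapped in fences as a block.
import Mathlib
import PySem

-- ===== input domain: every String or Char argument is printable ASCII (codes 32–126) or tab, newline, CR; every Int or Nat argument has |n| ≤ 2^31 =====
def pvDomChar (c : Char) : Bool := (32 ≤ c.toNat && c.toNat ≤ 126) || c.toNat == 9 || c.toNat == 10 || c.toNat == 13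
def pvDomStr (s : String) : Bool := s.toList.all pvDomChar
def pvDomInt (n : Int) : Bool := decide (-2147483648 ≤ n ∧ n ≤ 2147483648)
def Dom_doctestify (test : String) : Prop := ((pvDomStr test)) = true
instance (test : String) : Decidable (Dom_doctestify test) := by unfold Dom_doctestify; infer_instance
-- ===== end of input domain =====

-- B replaces A's threaded in_code_block flag by filtering skip lines first and then
-- emitting maximal consecutive comment/code runs; alternative decomposition, same cost.


-- ===== PORT A =====
-- the loop body of A's for-loop, over state (markdown_lines, in_code_block)
def pvStepA (st : List String × Bool) (line : String) : List String × Bool :=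
  if PySem.Str.startswith line "\\" || PySem.Str.isIn "-- pragma:hide" line then st
  else if PySem.Str.startswith line "--" && !PySem.Str.startswith line "---" then
    ((if st.2 then st.1 ++ ["```"] else st.1) ++ [PySem.Str.slice line (some 3) none], false)
  else
    ((if !st.2 then st.1 ++ ["``` postgres-console"] else st.1)
      ++ [PySem.Str.replace line "\u21B5" " "], true)

-- the trailing 'if in_code_block: append "```"'
def pvFinishA (st : List String × Bool) : List String :=
  if st.2 then st.1 ++ ["```"] else st.1

def doctestify (test : String) : String :=
  PySem.Str.join "\n" (pvFinishA ((PySem.Str.splitlines test).foldl pvStepA ([], false)))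

-- ===== PORT B =====
def pvIsComment (l : String) : Bool :=
  PySem.Str.startswith l "--" && !PySem.Str.startswith l "---"

def pvKeep (l : String) : Bool :=
  !(PySem.Str.startswith l "\\" || PySem.Str.isIn "-- pragma:hide" l)

-- B's while loop: consume one maximal run per iteration, appending to out
def pvEmit (out : List String) (rest : List String) : List String :=
  match rest with
  | [] => out
  | l :: ls =>
    if pvIsComment l then
      pvEmit (out ++ ((l :: ls).takeWhile pvIsComment).map
                (fun x => PySem.Str.slice x (some 3) none))
             ((l :: ls).dropWhile pvIsComment)
    else
      pvEmit (out ++ "``` postgres-console"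
                :: ((l :: ls).takeWhile (fun x => !pvIsComment x)).map
                     (fun x => PySem.Str.replace x "\u21B5" " ")
                ++ ["```"])
             ((l :: ls).dropWhile (fun x => !pvIsComment x))
termination_by rest.length
decreasing_by
  · have hle := List.length_dropWhile_le pvIsComment ls
    simp [‹pvIsComment l = true›]
    omega
  · have hf : pvIsComment l = false := Bool.eq_false_iff.mpr ‹¬pvIsComment l = true›
    have hle := List.length_dropWhile_le (fun x => !pvIsComment x) ls
    simp [hf]
    omega

def doctestify_alt (test : String) : String :=
  PySem.Str.join "\n" (pvEmit [] ((PySem.Str.splitlines test).filter pvKeep))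

-- ===== PRECONDITION & SPEC =====
def Spec_doctestify (test : String) (out : String) : Prop := out = doctestify_alt test
instance (test : String) (out : String) : Decidable (Spec_doctestify test out) := by unfold Spec_doctestify; infer_instance

-- ===== CLAIM (what is proved, stated in full; the proofs are below) =====
def Claim_equal_doctestify : Prop := ∀ (test : String), Dom_doctestify test → Spec_doctestify test (doctestify test)

-- ===== LEMMAS AND PROOFS =====

-- proof-only helper: A's behaviour from the in_code_block = true state
def pvClose (out : List String) (rest : List String) : List String :=
  match rest with
  | [] => out ++ ["```"]
  | l :: ls =>
    if pvIsComment l then pvEmit (out ++ ["```"]) (l :: ls)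
    else pvClose (out ++ [PySem.Str.replace l "\u21B5" " "]) ls

-- A's fold skips exactly the lines pvKeep rejects
theorem pvFoldA_filter (lines : List String) (st : List String × Bool) :
    lines.foldl pvStepA st = (lines.filter pvKeep).foldl pvStepA st := by
  induction lines generalizing st with
  | nil => rfl
  | cons l ls ih =>
    by_cases hc : (PySem.Str.startswith l "\\" || PySem.Str.isIn "-- pragma:hide" l) = true
    · have hk : pvKeep l = false := by unfold pvKeep; rw [hc]; rfl
      have hstep : pvStepA st l = st := by unfold pvStepA; rw [if_pos hc]
      rw [List.foldl_cons, hstep, List.filter_cons, ih]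
      simp [hk]
    · have hc' : (PySem.Str.startswith l "\\" || PySem.Str.isIn "-- pragma:hide" l) = false :=
        Bool.eq_false_iff.mpr hc
      have hk : pvKeep l = true := by unfold pvKeep; rw [hc']; rfl
      rw [List.foldl_cons, List.filter_cons]
      simp only [hk, if_true]
      rw [List.foldl_cons, ih]

-- a comment run at the head of rest can be absorbed into out in one step
theorem pvEmit_comment_absorb (rest : List String) (out : List String) :
    pvEmit out rest
      = pvEmit (out ++ (rest.takeWhile pvIsComment).map
                  (fun x => PySem.Str.slice x (some 3) none))
               (rest.dropWhile pvIsComment) := by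
  match rest with
  | [] => simp [pvEmit]
  | l :: ls =>
    by_cases h : pvIsComment l = true
    · rw [pvEmit]; simp [h]
    · have hf : pvIsComment l = false := Bool.eq_false_iff.mpr h
      simp [hf]

-- pvClose closes the current code run and continues as pvEmit
theorem pvClose_eq_pvEmit (rest : List String) (out : List String) :
    pvClose out rest
      = pvEmit (out ++ (rest.takeWhile (fun x => !pvIsComment x)).map
                  (fun x => PySem.Str.replace x "\u21B5" " ") ++ ["```"])
               (rest.dropWhile (fun x => !pvIsComment x)) := by
  induction rest generalizing out with
  | nil => simp [pvClose, pvEmit]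
  | cons l ls ih =>
    by_cases h : pvIsComment l = true
    · simp [pvClose, h]
    · have hf : pvIsComment l = false := Bool.eq_false_iff.mpr h
      simp only [pvClose, hf, Bool.false_eq_true, if_false, ih,
        List.takeWhile_cons, List.dropWhile_cons, Bool.not_false, if_true,
        List.map_cons]
      simp [List.append_assoc]

-- main invariant: A's fold from either flag state equals B's run-based emission
theorem pvInvariant (ks : List String) (hk : ∀ l ∈ ks, pvKeep l = true) :
    (∀ acc, pvFinishA (ks.foldl pvStepA (acc, false)) = pvEmit acc ks)
    ∧ (∀ acc, pvFinishA (ks.foldl pvStepA (acc, true)) = pvClose acc ks) := by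
  induction ks with
  | nil => exact ⟨fun acc => by simp [pvFinishA, pvEmit], fun acc => by simp [pvFinishA, pvClose]⟩
  | cons l ls ih =>
    have hl : pvKeep l = true := hk l (List.mem_cons_self)
    have hls : ∀ x ∈ ls, pvKeep x = true := fun x hx => hk x (List.mem_cons_of_mem _ hx)
    have hskip : ¬ ((PySem.Str.startswith l "\\" || PySem.Str.isIn "-- pragma:hide" l) = true) := by
      unfold pvKeep at hl
      rw [Bool.not_eq_true'] at hl
      rw [hl]
      simp
    obtain ⟨ih1, ih2⟩ := ih hls
    constructor
    · intro acc
      by_cases h : pvIsComment l = true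
      · have h' : (PySem.Str.startswith l "--" && !PySem.Str.startswith l "---") = true := h
        have hstep : pvStepA (acc, false) l
            = (acc ++ [PySem.Str.slice l (some 3) none], false) := by
          unfold pvStepA; rw [if_neg hskip, if_pos h']; rfl
        rw [List.foldl_cons, hstep, ih1,
            pvEmit_comment_absorb ls (acc ++ [PySem.Str.slice l (some 3) none]),
            pvEmit_comment_absorb (l :: ls) acc]
        simp [h, List.append_assoc]
      · have h' : ¬ ((PySem.Str.startswith l "--" && !PySem.Str.startswith l "---") = true) := h
        have hf : pvIsComment l = false := Bool.eq_false_iff.mpr h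
        have hstep : pvStepA (acc, false) l
            = (acc ++ ["``` postgres-console"] ++ [PySem.Str.replace l "\u21B5" " "], true) := by
          unfold pvStepA; rw [if_neg hskip, if_neg h']; rfl
        rw [List.foldl_cons, hstep, ih2,
            pvClose_eq_pvEmit ls (acc ++ ["``` postgres-console"] ++ [PySem.Str.replace l "\u21B5" " "])]
        conv_rhs => rw [pvEmit]
        simp [hf, List.append_assoc]
    · intro acc
      by_cases h : pvIsComment l = true
      · have h' : (PySem.Str.startswith l "--" && !PySem.Str.startswith l "---") = true := h
        have hstep : pvStepA (acc, true) l
            = ((acc ++ ["```"]) ++ [PySem.Str.slice l (some 3) none], false) := by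
          unfold pvStepA; rw [if_neg hskip, if_pos h']; rfl
        rw [List.foldl_cons, hstep, ih1]
        conv_rhs => rw [pvClose]
        rw [if_pos h,
            pvEmit_comment_absorb ls ((acc ++ ["```"]) ++ [PySem.Str.slice l (some 3) none]),
            pvEmit_comment_absorb (l :: ls) (acc ++ ["```"])]
        simp [h, List.append_assoc]
      · have h' : ¬ ((PySem.Str.startswith l "--" && !PySem.Str.startswith l "---") = true) := h
        have hstep : pvStepA (acc, true) l
            = (acc ++ [PySem.Str.replace l "\u21B5" " "], true) := by
          unfold pvStepA; rw [if_neg hskip, if_neg h']; rfl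
        rw [List.foldl_cons, hstep, ih2]
        conv_rhs => rw [pvClose]
        rw [if_neg h]

-- ===== VERDICT (by name: the statement is the Claim_ definition above) =====
theorem doctestify_spec : Claim_equal_doctestify := by
  intro test _
  unfold Spec_doctestify doctestify doctestify_alt
  rw [pvFoldA_filter,
      (pvInvariant ((PySem.Str.splitlines test).filter pvKeep)
        (fun l hl => List.of_mem_filter hl)).1 []]
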